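-- pv_equiv track=rewrite | github.com/hamodadjjddj/All-In-Trading-Bot | social media.py | _match_ticker
-- ===== SOURCE A (Python) =====
-- def _match_ticker(text, tickers):
--     text_upper = text.upper()
--     for category, ticker_list in tickers.items():
--         for ticker in ticker_list:
--             patterns = [f"${ticker}", f" {ticker} ", f"${ticker.lower()}", f" {ticker.lower()} "]
--             if any(pattern in text_upper or pattern.lower() in text.lower() for pattern in patterns):
--                 return ticker
--     return None
-- ===== SOURCE B (Python) =====
-- def _match_ticker(text, tickers):
--     # Text-driven scan: index all tickers by their lowercase form (first
--     # occurrence wins), then walk the lowercased text ONCE; at each '$' or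
--     # inter-space position probe the index for each distinct ticker length,
--     # keeping the matched ticker of lowest priority (dict/list order).
--     hay = text.lower()
--     pat = {}  # lowercase ticker -> (priority, original ticker)
--     i = 0
--     for lst in tickers.values():
--         for t in lst:
--             pat.setdefault(t.lower(), (i, t))
--             i += 1
--     lengths = sorted({len(k) for k in pat})
--     n = len(hay)
--     best = None
--     for j in range(n):
--         c = hay[j]
--         if c == '$':
--             for L in lengths:
--                 hit = pat.get(hay[j + 1:j + 1 + L])
--                 if hit is not None and (best is None or hit[0] < best[0]):
--                     best = hit
--         elif c == ' ':
--             for L in lengths: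
--                 if j + 1 + L < n and hay[j + 1 + L] == ' ':
--                     hit = pat.get(hay[j + 1:j + 1 + L])
--                     if hit is not None and (best is None or hit[0] < best[0]):
--                         best = hit
--     return best[1] if best is not None else None
-- ===== Notes on version B (the rewrite author's own statement) =====
-- stated objective: faster
-- what changed: A probes the text separately for four upper/lower pattern variants of every ticker (and re-lowercases the text per pattern); B instead builds a dict from lowercase ticker to (priority, original ticker) once, then scans the lowercased text a single time, probing the dict with the slice after each '$' and between each pair of spaces for every distinct ticker length, and returns the matched ticker of lowest priority.
import Mathlib
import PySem

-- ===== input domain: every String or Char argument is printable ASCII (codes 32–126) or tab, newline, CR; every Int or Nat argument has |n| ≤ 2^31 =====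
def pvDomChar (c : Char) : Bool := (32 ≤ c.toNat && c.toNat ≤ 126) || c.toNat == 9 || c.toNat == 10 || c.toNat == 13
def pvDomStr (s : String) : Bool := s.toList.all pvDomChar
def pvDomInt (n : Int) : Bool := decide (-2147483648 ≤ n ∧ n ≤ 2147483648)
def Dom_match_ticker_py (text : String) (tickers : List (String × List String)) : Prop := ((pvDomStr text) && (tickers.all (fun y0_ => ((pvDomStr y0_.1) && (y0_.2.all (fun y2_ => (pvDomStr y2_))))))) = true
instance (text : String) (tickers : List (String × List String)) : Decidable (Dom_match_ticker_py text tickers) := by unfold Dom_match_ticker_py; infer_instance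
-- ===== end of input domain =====

-- B replaces A's per-ticker substring probing (four upper/lower pattern variants,
-- each scanned over the text) by a text-driven scan: it indexes all tickers by
-- their lowercase form in a dict once, then walks the lowercased text a single
-- time, probing the dict at '$'- and space-delimited positions and keeping the
-- matched ticker of lowest priority (dict/list order) — a different, measurably
-- faster algorithm (one scan of the text instead of one per ticker pattern).

-- ===== PORT A =====
-- inner 'for ticker in ticker_list' loop with its early return
def matchTickerA_inner (textUpper : String) (text : String) : List String → Option String
  | [] => none
  | ticker :: rest =>
    let patterns := ["$" ++ ticker, " " ++ ticker ++ " ",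
                     "$" ++ PySem.Str.lower ticker, " " ++ PySem.Str.lower ticker ++ " "]
    if patterns.any (fun pattern =>
        PySem.Str.isIn pattern textUpper || PySem.Str.isIn (PySem.Str.lower pattern) (PySem.Str.lower text)) then
      some ticker
    else
      matchTickerA_inner textUpper text rest

-- outer 'for category, ticker_list in tickers.items()' loop
def matchTickerA_outer (textUpper : String) (text : String) : List (String × List String) → Option String
  | [] => none
  | (_category, tickerList) :: rest =>
    match matchTickerA_inner textUpper text tickerList with
    | some ticker => some ticker
    | none => matchTickerA_outer textUpper text rest

def match_ticker_py (text : String) (tickers : List (String × List String)) : Option String :=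
  let textUpper := PySem.Str.upper text
  matchTickerA_outer textUpper text tickers

-- ===== PORT B =====
-- 'pat.setdefault(t.lower(), (i, t)); i += 1' step of the indexing loop
def bInsert (st : Nat × PySem.Dict String (Nat × String)) (t : String) :
    Nat × PySem.Dict String (Nat × String) :=
  (st.1 + 1, st.2.setdefault (PySem.Str.lower t) (st.1, t))

-- 'if hit is not None and (best is None or hit[0] < best[0]): best = hit'
def bUpd (best : Option (Nat × String)) (hit : Option (Nat × String)) : Option (Nat × String) :=
  match hit with
  | none => best
  | some h =>
    match best with
    | none => some h
    | some b => if h.1 < b.1 then some h else best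

def match_ticker_py_alt (text : String) (tickers : List (String × List String)) : Option String :=
  let hay := PySem.Str.lower text
  let pat := (tickers.foldl (fun st p => p.2.foldl bInsert st)
      ((0, PySem.Dict.empty) : Nat × PySem.Dict String (Nat × String))).2
  let lengths := PySem.List.sorted (PySem.Set.ofList (pat.keys.map PySem.Str.len)) (fun x => x) false
  let n := PySem.Str.len hay
  let best := (PySem.List.pyRange 0 n 1).foldl (fun best j =>
      match PySem.Str.pyGet? hay j with
      | none => best            -- unreachable: j ∈ range(n)
      | some c =>
        if c = '$' then
          lengths.foldl (fun best L =>
            bUpd best (pat.get? (PySem.Str.slice hay (some (j + 1)) (some (j + 1 + L))))) best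
        else if c = ' ' then
          lengths.foldl (fun best L =>
            if j + 1 + L < n ∧ PySem.Str.pyGet? hay (j + 1 + L) = some ' ' then
              bUpd best (pat.get? (PySem.Str.slice hay (some (j + 1)) (some (j + 1 + L))))
            else best) best
        else best) none
  best.map (·.2)

-- ===== PRECONDITION & SPEC =====
def Spec_match_ticker_py (text : String) (tickers : List (String × List String)) (out : Option String) : Prop := out = match_ticker_py_alt text tickers
instance (text : String) (tickers : List (String × List String)) (out : Option String) : Decidable (Spec_match_ticker_py text tickers out) := by unfold Spec_match_ticker_py; infer_instance

-- ===== CLAIM (what is proved, stated in full; the proofs are below) =====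
def Claim_equal_match_ticker_py : Prop := ∀ (text : String) (tickers : List (String × List String)), Dom_match_ticker_py text tickers → Spec_match_ticker_py text tickers (match_ticker_py text tickers)

-- ===== LEMMAS AND PROOFS =====

-- ---------- shared: the matching condition both programs decide ----------
-- cond hay t: "$t" or " t " (lowercased) occurs in the lowercased text
def tickCond (hay t : String) : Bool :=
  PySem.Str.isIn ("$" ++ PySem.Str.lower t) hay ||
  PySem.Str.isIn (" " ++ PySem.Str.lower t ++ " ") hay

-- ---------- A-side: A is find? tickCond over the flattened ticker lists ----------
theorem lowerChar_upperChar (c : Char) :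
    PySem.Chars.lowerChar (PySem.Chars.upperChar c) = PySem.Chars.lowerChar c := by
  simp only [PySem.Chars.lowerChar, PySem.Chars.upperChar, PySem.Chars.islower, PySem.Chars.isupper,
    Bool.and_eq_true, decide_eq_true_eq]
  have hto : ∀ a b : Char, (a.val ≤ b.val) ↔ a.toNat ≤ b.toNat := fun _ _ => UInt32.le_iff_toNat_le
  have htv : ∀ n : Nat, n.isValidChar → (Char.ofNat n).toNat = n := fun n hv => by simp [Char.ofNat, hv]
  have ha : 'a'.toNat = 97 := rfl
  have hzz : 'z'.toNat = 122 := rfl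
  have hA : 'A'.toNat = 65 := rfl
  have hZ : 'Z'.toNat = 90 := rfl
  split_ifs with h1 h2 h3
  all_goals simp only [Char.le_def, hto] at *
  · exfalso; omega
  · have hv : Nat.isValidChar (c.toNat - 32) := Or.inl (by omega)
    rw [htv _ hv]
    have h32 : c.toNat - 32 + 32 = c.toNat := by omega
    rw [h32, Char.ofNat_toNat]
  · exfalso; omega
  · exfalso
    have hv : Nat.isValidChar (c.toNat - 32) := Or.inl (by omega)
    rw [htv _ hv] at h2
    omega

theorem lowerChar_lowerChar (c : Char) :
    PySem.Chars.lowerChar (PySem.Chars.lowerChar c) = PySem.Chars.lowerChar c := by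
  simp only [PySem.Chars.lowerChar, PySem.Chars.isupper, Bool.and_eq_true, decide_eq_true_eq]
  have hto : ∀ a b : Char, (a.val ≤ b.val) ↔ a.toNat ≤ b.toNat := fun _ _ => UInt32.le_iff_toNat_le
  have htv : ∀ n : Nat, n.isValidChar → (Char.ofNat n).toNat = n := fun n hv => by simp [Char.ofNat, hv]
  have hA : 'A'.toNat = 65 := rfl
  have hZ : 'Z'.toNat = 90 := rfl
  split_ifs with h1 h2
  all_goals simp only [Char.le_def, hto] at *
  · exfalso
    have hv : Nat.isValidChar (c.toNat + 32) := Or.inl (by omega)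
    rw [htv _ hv] at h2
    omega

theorem lower_upper (l : List Char) :
    PySem.Chars.lower (PySem.Chars.upper l) = PySem.Chars.lower l := by
  simp [PySem.Chars.lower, PySem.Chars.upper, List.map_map, Function.comp_def, lowerChar_upperChar]

theorem upper_side_redundant (p l : List Char) :
    (PySem.Chars.isIn p (PySem.Chars.upper l) || PySem.Chars.isIn (PySem.Chars.lower p) (PySem.Chars.lower l))
      = PySem.Chars.isIn (PySem.Chars.lower p) (PySem.Chars.lower l) := by
  rw [Bool.eq_iff_iff]
  simp only [Bool.or_eq_true, PySem.Chars.isIn_iff_infix]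
  constructor
  · rintro (h | h)
    · have h2 : PySem.Chars.lower p <:+: PySem.Chars.lower (PySem.Chars.upper l) :=
        h.map PySem.Chars.lowerChar
      rw [lower_upper] at h2
      exact h2
    · exact h
  · exact Or.inr

theorem cond_eq (text t : String) :
    (["$" ++ t, " " ++ t ++ " ",
      "$" ++ PySem.Str.lower t, " " ++ PySem.Str.lower t ++ " "].any (fun pattern =>
        PySem.Str.isIn pattern (PySem.Str.upper text) ||
        PySem.Str.isIn (PySem.Str.lower pattern) (PySem.Str.lower text)))
    = tickCond (PySem.Str.lower text) t := by
  have lc : PySem.Chars.lowerChar '$' = '$' := by decide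
  have ls : PySem.Chars.lowerChar ' ' = ' ' := by decide
  rw [Bool.eq_iff_iff]
  unfold tickCond
  simp only [List.any_cons, List.any_nil, Bool.or_false, PySem.Str.isIn,
    PySem.Str.toList_lower, PySem.Str.toList_upper, String.toList_append,
    upper_side_redundant]
  simp only [PySem.Chars.lower, List.map_append, List.map_map, Function.comp_def,
    lowerChar_lowerChar]
  simp [lc, ls, Bool.or_eq_true]
  tauto

theorem inner_eq (text : String) (lst : List String) :
    matchTickerA_inner (PySem.Str.upper text) text lst
      = lst.find? (tickCond (PySem.Str.lower text)) := by
  induction lst with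
  | nil => rfl
  | cons t rest ih =>
    simp only [matchTickerA_inner, List.find?]
    rw [cond_eq]
    cases tickCond (PySem.Str.lower text) t
    · simpa using ih
    · simp

theorem outer_eq (text : String) (tickers : List (String × List String)) :
    matchTickerA_outer (PySem.Str.upper text) text tickers
      = (tickers.flatMap (fun p => p.2)).find? (tickCond (PySem.Str.lower text)) := by
  induction tickers with
  | nil => rfl
  | cons p rest ih =>
    obtain ⟨cat, lst⟩ := p
    simp only [matchTickerA_outer, List.flatMap_cons, List.find?_append, inner_eq, ih]
    cases List.find? _ lst <;> rfl

-- ---------- B-side: the dict is first-match lookup over the flattened list ----------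
def specFind : Nat → List String → String → Option (Nat × String)
  | _, [], _ => none
  | i, t :: r, s => if PySem.Str.lower t = s then some (i, t) else specFind (i + 1) r s

theorem specFind_shift (ts : List String) (i : Nat) (s : String) :
    specFind i ts s = (specFind 0 ts s).map (fun q => (q.1 + i, q.2)) := by
  induction ts generalizing i with
  | nil => rfl
  | cons t r ih =>
    simp only [specFind]
    split
    · simp
    · rw [ih (i + 1), ih 1, Option.map_map]
      rcases specFind 0 r s with _ | q
      · simp
      · simp
        omega

theorem specFind_append (l1 l2 : List String) (i : Nat) (s : String) :
    specFind i (l1 ++ l2) s = (specFind i l1 s).or (specFind (i + l1.length) l2 s) := by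
  induction l1 generalizing i with
  | nil => simp [specFind]
  | cons t r ih =>
    simp only [List.cons_append, specFind]
    split
    · rfl
    · rw [ih (i + 1)]
      simp only [List.length_cons]
      congr 2
      omega

theorem bInner_fst (lst : List String) (st : Nat × PySem.Dict String (Nat × String)) :
    (lst.foldl bInsert st).1 = st.1 + lst.length := by
  induction lst generalizing st with
  | nil => simp
  | cons t r ih =>
    simp only [List.foldl_cons, ih, List.length_cons, bInsert]
    omega

theorem bInner_get? (lst : List String) (st : Nat × PySem.Dict String (Nat × String)) (s : String) :
    ((lst.foldl bInsert st).2).get? s = (st.2.get? s).or (specFind st.1 lst s) := by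
  induction lst generalizing st with
  | nil => simp [specFind]
  | cons t r ih =>
    simp only [List.foldl_cons, ih, bInsert, specFind]
    by_cases hs : PySem.Str.lower t = s
    · subst hs
      rw [PySem.Dict.get?_setdefault_self st.2, if_pos rfl]
      cases st.2.get? (PySem.Str.lower t)
      · simp
      · simp
    · rw [PySem.Dict.get?_setdefault_of_ne st.2 _ (Ne.symm hs)]
      simp [hs]

theorem bOuter_get? (tickers : List (String × List String))
    (st : Nat × PySem.Dict String (Nat × String)) (s : String) :
    ((tickers.foldl (fun st p => p.2.foldl bInsert st) st).2).get? s
      = (st.2.get? s).or (specFind st.1 (tickers.flatMap (fun p => p.2)) s) := by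
  induction tickers generalizing st with
  | nil => simp [specFind]
  | cons p r ih =>
    simp only [List.foldl_cons, ih, List.flatMap_cons, specFind_append, bInner_get?,
      bInner_fst, Option.or_assoc]

theorem spec0_sound (ts : List String) (s : String) (k : Nat) (t : String)
    (h : specFind 0 ts s = some (k, t)) :
    ∃ hk : k < ts.length, ts[k] = t ∧ PySem.Str.lower t = s := by
  induction ts generalizing k t with
  | nil => simp [specFind] at h
  | cons a r ih =>
    rw [specFind] at h
    split at h
    · rename_i hs
      simp only [Option.some.injEq, Prod.mk.injEq] at h
      obtain ⟨hk, ht⟩ := h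
      have hk0 : k = 0 := hk.symm
      subst hk0
      subst ht
      exact ⟨by simp, by simp, hs⟩
    · rename_i hs
      rw [specFind_shift, Option.map_eq_some_iff] at h
      obtain ⟨⟨k0, t0⟩, hq, he⟩ := h
      simp only [Prod.mk.injEq] at he
      obtain ⟨hek, het⟩ := he
      obtain ⟨hk0, ht0, hl0⟩ := ih k0 t0 hq
      subst het
      refine ⟨by simp; omega, ?_, hl0⟩
      have : k = k0 + 1 := by omega
      subst this
      simpa using ht0

theorem spec0_complete (ts : List String) (s : String) (k : Nat) (hk : k < ts.length)
    (hs : PySem.Str.lower ts[k] = s) :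
    ∃ k' t', k' ≤ k ∧ specFind 0 ts s = some (k', t') := by
  induction ts generalizing k with
  | nil => simp at hk
  | cons a r ih =>
    by_cases hs0 : PySem.Str.lower a = s
    · exact ⟨0, a, Nat.zero_le _, by simp [specFind, hs0]⟩
    · cases k with
      | zero => simp at hs; exact absurd hs hs0
      | succ k' =>
        have hk' : k' < r.length := by simpa using hk
        have hs' : PySem.Str.lower r[k'] = s := by simpa using hs
        obtain ⟨k0, t0, hle, hsf⟩ := ih k' hk' hs'
        refine ⟨k0 + 1, t0, by omega, ?_⟩
        rw [specFind, if_neg hs0, specFind_shift, hsf]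
        rfl

-- ---------- infix ↔ position characterisations ----------
theorem infix_cons_iff (c : Char) (p l : List Char) :
    (c :: p) <:+: l ↔ ∃ j : Nat, l[j]? = some c ∧ p <+: l.drop (j + 1) := by
  constructor
  · rintro ⟨s1, s2, rfl⟩
    refine ⟨s1.length, ?_, ?_⟩
    · rw [List.append_assoc, List.getElem?_append_right (le_refl _)]
      simp
    · have : s1 ++ (c :: p) ++ s2 = (s1 ++ [c]) ++ (p ++ s2) := by simp
      rw [this, List.drop_append_of_le_length (by simp)]
      simp [List.prefix_append]
  · rintro ⟨j, hj, r, hr⟩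
    have hjl : j < l.length := (List.getElem?_eq_some_iff.mp hj).1
    have hc : l[j] = c := (List.getElem?_eq_some_iff.mp hj).2
    have hdrop : List.drop j l = c :: (p ++ r) := by
      rw [← List.getElem_cons_drop hjl, hc, hr]
    refine ⟨l.take j, r, ?_⟩
    conv_rhs => rw [← List.take_append_drop j l, hdrop]
    simp

theorem prefix_append_singleton_iff (p : List Char) (a : Char) (d : List Char) :
    (p ++ [a]) <+: d ↔ p <+: d ∧ d[p.length]? = some a := by
  constructor
  · rintro ⟨r, rfl⟩
    refine ⟨(List.prefix_append p [a]).trans (List.prefix_append _ r), ?_⟩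
    rw [List.append_assoc, List.getElem?_append_right (le_refl _)]
    simp
  · rintro ⟨⟨r, rfl⟩, ha⟩
    rw [List.getElem?_append_right (le_refl _)] at ha
    simp only [Nat.sub_self] at ha
    cases r with
    | nil => simp at ha
    | cons b r' =>
      simp only [List.getElem?_cons_zero, Option.some.injEq] at ha
      subst ha
      exact ⟨r', by simp⟩

-- ---------- the scan fold as a minimum over collected hits ----------
def hitsAt (pat : PySem.Dict String (Nat × String)) (lengths : List Int) (hay : String)
    (n : Int) (j : Int) : List (Nat × String) :=
  match PySem.Str.pyGet? hay j with
  | none => []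
  | some c =>
    if c = '$' then
      lengths.filterMap (fun L => pat.get? (PySem.Str.slice hay (some (j + 1)) (some (j + 1 + L))))
    else if c = ' ' then
      lengths.filterMap (fun L =>
        if j + 1 + L < n ∧ PySem.Str.pyGet? hay (j + 1 + L) = some ' ' then
          pat.get? (PySem.Str.slice hay (some (j + 1)) (some (j + 1 + L)))
        else none)
    else []

theorem foldl_bUpd_filterMap {α : Type} (l : List α) (f : α → Option (Nat × String))
    (best : Option (Nat × String)) :
    l.foldl (fun b x => bUpd b (f x)) best
      = (l.filterMap f).foldl (fun b q => bUpd b (some q)) best := by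
  induction l generalizing best with
  | nil => rfl
  | cons x t ih =>
    simp only [List.foldl_cons, List.filterMap_cons]
    cases hx : f x with
    | none => rw [ih]; rfl
    | some h => rw [ih]; rfl

theorem scan_eq_hits (pat : PySem.Dict String (Nat × String)) (lengths : List Int)
    (hay : String) (n : Int) :
    (PySem.List.pyRange 0 n 1).foldl (fun best j =>
      match PySem.Str.pyGet? hay j with
      | none => best
      | some c =>
        if c = '$' then
          lengths.foldl (fun best L =>
            bUpd best (pat.get? (PySem.Str.slice hay (some (j + 1)) (some (j + 1 + L))))) best
        else if c = ' ' then
          lengths.foldl (fun best L =>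
            if j + 1 + L < n ∧ PySem.Str.pyGet? hay (j + 1 + L) = some ' ' then
              bUpd best (pat.get? (PySem.Str.slice hay (some (j + 1)) (some (j + 1 + L))))
            else best) best
        else best) none
    = ((PySem.List.pyRange 0 n 1).flatMap (hitsAt pat lengths hay n)).foldl
        (fun b q => bUpd b (some q)) none := by
  rw [List.foldl_flatMap]
  apply PySem.List.foldl_congr_mem
  intro best j _
  unfold hitsAt
  cases hc : PySem.Str.pyGet? hay j with
  | none => rfl
  | some c =>
    dsimp only
    by_cases h1 : c = '$'
    · subst h1
      rw [if_pos rfl, if_pos rfl]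
      exact foldl_bUpd_filterMap lengths _ best
    · by_cases h2 : c = ' '
      · subst h2
        rw [if_neg (by decide : ¬(' ' = '$')), if_neg (by decide : ¬(' ' = '$')), if_pos rfl, if_pos rfl]
        have hstep :
            List.foldl (fun best L =>
              if j + 1 + L < n ∧ PySem.Str.pyGet? hay (j + 1 + L) = some ' ' then
                bUpd best (pat.get? (PySem.Str.slice hay (some (j + 1)) (some (j + 1 + L))))
              else best) best lengths
            = List.foldl (fun best L =>
                bUpd best (if j + 1 + L < n ∧ PySem.Str.pyGet? hay (j + 1 + L) = some ' ' then
                  pat.get? (PySem.Str.slice hay (some (j + 1)) (some (j + 1 + L))) else none)) best lengths := by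
          apply PySem.List.foldl_congr_mem
          intro b L _
          split
          · rfl
          · rfl
        rw [hstep]
        exact foldl_bUpd_filterMap lengths _ best
      · rw [if_neg h1, if_neg h1, if_neg h2, if_neg h2]
        simp

theorem foldl_bUpd_min (hits : List (Nat × String)) (b : Option (Nat × String))
    (p : Nat × String) (h : hits.foldl (fun b q => bUpd b (some q)) b = some p) :
    (b = some p ∨ p ∈ hits) ∧ (∀ q ∈ hits, p.1 ≤ q.1) ∧ (∀ b0, b = some b0 → p.1 ≤ b0.1) := by
  induction hits generalizing b with
  | nil =>
    simp only [List.foldl_nil] at h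
    exact ⟨Or.inl h, by simp, fun b0 hb0 => by rw [h] at hb0; injection hb0 with e; exact le_of_eq (by rw [e])⟩
  | cons q t ih =>
    simp only [List.foldl_cons] at h
    obtain ⟨hmem, hmin, hb⟩ := ih (bUpd b (some q)) h
    have hx : ∃ x, bUpd b (some q) = some x ∧ (x = q ∨ b = some x) ∧ x.1 ≤ q.1 ∧ (∀ b0, b = some b0 → x.1 ≤ b0.1) := by
      cases b with
      | none => exact ⟨q, rfl, Or.inl rfl, le_refl _, by simp⟩
      | some b0 =>
        by_cases hlt : q.1 < b0.1
        · exact ⟨q, by simp [bUpd, hlt], Or.inl rfl, le_refl _, fun b1 hb1 => by injection hb1 with e; rw [← e]; omega⟩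
        · exact ⟨b0, by simp [bUpd, hlt], Or.inr rfl, by omega, fun b1 hb1 => by injection hb1 with e; rw [← e]⟩
    obtain ⟨x, hxe, hxor, hxq, hxb⟩ := hx
    have hpx : p.1 ≤ x.1 := hb x hxe
    refine ⟨?_, ?_, ?_⟩
    · rcases hmem with hm | hm
      · rw [hxe] at hm
        injection hm with e
        subst e
        rcases hxor with h1 | h1
        · exact Or.inr (by simp [h1])
        · exact Or.inl h1
      · exact Or.inr (List.mem_cons_of_mem _ hm)
    · intro r hr
      rcases List.mem_cons.mp hr with h1 | h1
      · subst h1; omega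
      · exact hmin r h1
    · intro b0 hb0
      have := hxb b0 hb0
      omega

theorem foldl_bUpd_isSome (hits : List (Nat × String)) (b0 : Nat × String)
    (b : Option (Nat × String)) (hb : b = some b0) :
    ∃ p, hits.foldl (fun b q => bUpd b (some q)) b = some p := by
  induction hits generalizing b0 b with
  | nil => exact ⟨b0, hb⟩
  | cons q t ih =>
    subst hb
    simp only [List.foldl_cons]
    by_cases hlt : q.1 < b0.1
    · exact ih q _ (by simp [bUpd, hlt])
    · exact ih b0 _ (by simp [bUpd, hlt])

theorem foldl_bUpd_none (hits : List (Nat × String))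
    (h : hits.foldl (fun b q => bUpd b (some q)) none = none) : hits = [] := by
  cases hits with
  | nil => rfl
  | cons q t =>
    simp only [List.foldl_cons] at h
    obtain ⟨p, hp⟩ := foldl_bUpd_isSome t q (bUpd none (some q)) rfl
    rw [hp] at h
    exact absurd h (by simp)

theorem hits_sound (ts : List String) (pat : PySem.Dict String (Nat × String))
    (lengths : List Int) (hay : String) (n : Int)
    (hn : n = (hay.toList.length : Int))
    (hpat : ∀ s, pat.get? s = specFind 0 ts s)
    (hlen : ∀ L ∈ lengths, ∃ Ln : Nat, L = (Ln : Int))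
    (j : Int) (hj : 0 ≤ j) (p : Nat × String)
    (hp : p ∈ hitsAt pat lengths hay n j) :
    ∃ hk : p.1 < ts.length, ts[p.1] = p.2 ∧ tickCond hay ts[p.1] = true := by
  obtain ⟨jn, rfl⟩ : ∃ jn : Nat, j = (jn : Int) := ⟨j.toNat, (Int.toNat_of_nonneg hj).symm⟩
  unfold hitsAt at hp
  cases hc : PySem.Str.pyGet? hay (jn : Int) with
  | none => rw [hc] at hp; simp at hp
  | some c =>
    rw [hc] at hp
    dsimp only at hp
    have hslice : ∀ Ln : Nat,
        (PySem.Str.slice hay (some ((jn:Int) + 1)) (some ((jn:Int) + 1 + (Ln:Int)))).toList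
          = (hay.toList.drop (jn + 1)).take Ln := by
      intro Ln
      have h1' : ((jn:Int) + 1) = ((jn + 1 : Nat) : Int) := by push_cast; ring
      have h2' : ((jn:Int) + 1 + (Ln:Int)) = (((jn + 1 : Nat) : Int)) + ((Ln : Nat) : Int) := by
        push_cast; ring
      rw [h2', h1']
      simp only [PySem.Str.toList_slice, PySem.Chars.slice_eq_listSlice, PySem.List.slice_natCast_add]
    have hget : hay.toList[jn]? = some c := by simpa using hc
    by_cases h1 : c = '$'
    · subst h1
      rw [if_pos rfl] at hp
      obtain ⟨L, hL, hf⟩ := List.mem_filterMap.mp hp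
      obtain ⟨Ln, rfl⟩ := hlen L hL
      obtain ⟨hk, hts, hlow⟩ := spec0_sound ts _ p.1 p.2 (by rw [← hpat]; simpa using hf)
      refine ⟨hk, hts, ?_⟩
      unfold tickCond
      rw [Bool.or_eq_true]
      left
      rw [PySem.Str.isIn_iff_infix, hts, String.toList_append, hlow]
      have : ("$" : String).toList = ['$'] := rfl
      rw [this, hslice Ln, List.singleton_append]
      exact (infix_cons_iff _ _ _).mpr ⟨jn, hget, List.take_prefix _ _⟩
    · by_cases h2 : c = ' '
      · subst h2
        rw [if_neg h1, if_pos rfl] at hp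
        obtain ⟨L, hL, hf⟩ := List.mem_filterMap.mp hp
        obtain ⟨Ln, rfl⟩ := hlen L hL
        by_cases hg : (jn:Int) + 1 + (Ln:Int) < n ∧
            PySem.Str.pyGet? hay ((jn:Int) + 1 + (Ln:Int)) = some ' '
        swap
        · rw [if_neg hg] at hf; exact absurd hf (by simp)
        rw [if_pos hg] at hf
        have hlt : jn + 1 + Ln < hay.toList.length := by
          have := hg.1
          rw [hn] at this
          exact_mod_cast this
        have hsp : hay.toList[jn + 1 + Ln]? = some ' ' := by
          have h3' : ((jn:Int) + 1 + (Ln:Int)) = ((jn + 1 + Ln : Nat) : Int) := by push_cast; ring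
          have := hg.2
          rw [h3', PySem.Str.pyGet?_natCast] at this
          exact this
        have hlenslice : ((hay.toList.drop (jn + 1)).take Ln).length = Ln := by
          simp only [List.length_take, List.length_drop]
          omega
        obtain ⟨hk, hts, hlow⟩ := spec0_sound ts _ p.1 p.2 (by rw [← hpat]; simpa using hf)
        refine ⟨hk, hts, ?_⟩
        unfold tickCond
        rw [Bool.or_eq_true]
        right
        rw [PySem.Str.isIn_iff_infix, hts]
        have : (" " ++ PySem.Str.lower p.2 ++ " ").toList
            = ' ' :: ((PySem.Str.lower p.2).toList ++ [' ']) := by simp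
        rw [this, hlow, hslice Ln]
        refine (infix_cons_iff _ _ _).mpr ⟨jn, hget, ?_⟩
        refine (prefix_append_singleton_iff _ _ _).mpr ⟨List.take_prefix _ _, ?_⟩
        rw [hlenslice, List.getElem?_drop]
        simpa [Nat.add_assoc] using hsp
      · rw [if_neg h1, if_neg h2] at hp
        simp at hp

theorem hits_complete (ts : List String) (pat : PySem.Dict String (Nat × String))
    (lengths : List Int) (hay : String) (n : Int)
    (hn : n = (hay.toList.length : Int))
    (hpat : ∀ s, pat.get? s = specFind 0 ts s)
    (hkey : ∀ s q, pat.get? s = some q → ((s.toList.length : Nat) : Int) ∈ lengths)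
    (k : Nat) (hk : k < ts.length) (hcond : tickCond hay ts[k] = true) :
    ∃ j ∈ PySem.List.pyRange 0 n 1, ∃ p ∈ hitsAt pat lengths hay n j, p.1 ≤ k := by
  obtain ⟨k', t', hle, hsf⟩ := spec0_complete ts (PySem.Str.lower ts[k]) k hk rfl
  have hget : pat.get? (PySem.Str.lower ts[k]) = some (k', t') := by rw [hpat]; exact hsf
  have hLmem := hkey _ _ hget
  set s0 := PySem.Str.lower ts[k] with hs0
  have hslice : ∀ jn : Nat, s0.toList <+: hay.toList.drop (jn + 1) →
      PySem.Str.slice hay (some ((jn:Int) + 1)) (some ((jn:Int) + 1 + ((s0.toList.length : Nat) : Int))) = s0 := by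
    intro jn hpre
    apply String.toList_inj.mp
    have h1' : ((jn:Int) + 1) = ((jn + 1 : Nat) : Int) := by push_cast; ring
    have h2' : ((jn:Int) + 1 + ((s0.toList.length : Nat) : Int))
        = (((jn + 1 : Nat) : Int)) + ((s0.toList.length : Nat) : Int) := by push_cast; ring
    rw [h2', h1']
    simp only [PySem.Str.toList_slice, PySem.Chars.slice_eq_listSlice, PySem.List.slice_natCast_add]
    exact (List.prefix_iff_eq_take.mp hpre).symm
  unfold tickCond at hcond
  rw [Bool.or_eq_true] at hcond
  rcases hcond with hcd | hcd
  · rw [PySem.Str.isIn_iff_infix] at hcd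
    have hcd' : ('$' :: s0.toList) <:+: hay.toList := by
      have : ("$" ++ s0).toList = '$' :: s0.toList := by simp
      rwa [this] at hcd
    obtain ⟨jn, hget?, hpre⟩ := (infix_cons_iff _ _ _).mp hcd'
    have hjn : jn < hay.toList.length := (List.getElem?_eq_some_iff.mp hget?).1
    refine ⟨(jn : Int), ?_, (k', t'), ?_, hle⟩
    · rw [PySem.List.mem_pyRange_one, hn]
      exact ⟨by positivity, by exact_mod_cast hjn⟩
    · unfold hitsAt
      have hcj : PySem.Str.pyGet? hay (jn : Int) = some '$' := by simpa using hget?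
      rw [hcj]
      dsimp only
      rw [if_pos rfl]
      refine List.mem_filterMap.mpr ⟨((s0.toList.length : Nat) : Int), hLmem, ?_⟩
      rw [hslice jn hpre]
      exact hget
  · rw [PySem.Str.isIn_iff_infix] at hcd
    have hcd' : (' ' :: (s0.toList ++ [' '])) <:+: hay.toList := by
      have : (" " ++ s0 ++ " ").toList = ' ' :: (s0.toList ++ [' ']) := by simp
      rwa [this] at hcd
    obtain ⟨jn, hget?, hpre2⟩ := (infix_cons_iff _ _ _).mp hcd'
    obtain ⟨hpre, hsp⟩ := (prefix_append_singleton_iff _ _ _).mp hpre2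
    have hjn : jn < hay.toList.length := (List.getElem?_eq_some_iff.mp hget?).1
    rw [List.getElem?_drop] at hsp
    have hlt : jn + 1 + s0.toList.length < hay.toList.length := by
      have := (List.getElem?_eq_some_iff.mp hsp).1
      omega
    have h3' : ((jn:Int) + 1 + ((s0.toList.length : Nat) : Int))
        = ((jn + 1 + s0.toList.length : Nat) : Int) := by push_cast; ring
    have hg : (jn:Int) + 1 + ((s0.toList.length : Nat) : Int) < n ∧
        PySem.Str.pyGet? hay ((jn:Int) + 1 + ((s0.toList.length : Nat) : Int)) = some ' ' := by
      constructor
      · rw [hn, h3']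
        exact_mod_cast hlt
      · rw [h3', PySem.Str.pyGet?_natCast]
        exact hsp
    refine ⟨(jn : Int), ?_, (k', t'), ?_, hle⟩
    · rw [PySem.List.mem_pyRange_one, hn]
      exact ⟨by positivity, by exact_mod_cast hjn⟩
    · unfold hitsAt
      have hcj : PySem.Str.pyGet? hay (jn : Int) = some ' ' := by simpa using hget?
      rw [hcj]
      dsimp only
      rw [if_neg (by decide : ¬(' ' = '$')), if_pos rfl]
      refine List.mem_filterMap.mpr ⟨((s0.toList.length : Nat) : Int), hLmem, ?_⟩
      rw [if_pos hg, hslice jn hpre]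
      exact hget

-- ===== VERDICT helper: B equals find? tickCond =====
theorem alt_eq (text : String) (tickers : List (String × List String)) :
    match_ticker_py_alt text tickers
      = (tickers.flatMap (fun p => p.2)).find? (tickCond (PySem.Str.lower text)) := by
  unfold match_ticker_py_alt
  dsimp only
  rw [scan_eq_hits]
  set hay := PySem.Str.lower text with hhay
  set ts := tickers.flatMap (fun p => p.2) with hts
  set pat := (tickers.foldl (fun st p => p.2.foldl bInsert st)
      ((0, PySem.Dict.empty) : Nat × PySem.Dict String (Nat × String))).2 with hpatdef
  set lengths := PySem.List.sorted (PySem.Set.ofList (pat.keys.map PySem.Str.len)) (fun x => x) false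
    with hlendef
  set n := PySem.Str.len hay with hndef
  have hn : n = (hay.toList.length : Int) := by rw [hndef]; simp [pysem]
  have hpat : ∀ s, pat.get? s = specFind 0 ts s := by
    intro s
    rw [hpatdef, bOuter_get?]
    simp only [PySem.Dict.get?_empty, Option.none_or]
    rw [← hts]
  have hlenA : ∀ L ∈ lengths, ∃ Ln : Nat, L = (Ln : Int) := by
    intro L hL
    rw [hlendef, PySem.List.mem_sorted, PySem.Set.mem_ofList, List.mem_map] at hL
    obtain ⟨key, _, hk⟩ := hL
    exact ⟨key.toList.length, by rw [← hk]; simp [pysem]⟩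
  have hkey : ∀ s q, pat.get? s = some q → ((s.toList.length : Nat) : Int) ∈ lengths := by
    intro s q hq
    have hmem : s ∈ pat.keys := by
      by_contra hnm
      rw [← PySem.Dict.get?_eq_none_iff_not_mem_keys] at hnm
      rw [hnm] at hq
      exact absurd hq (by simp)
    rw [hlendef, PySem.List.mem_sorted, PySem.Set.mem_ofList, List.mem_map]
    exact ⟨s, hmem, by simp [pysem]⟩
  cases hr : ((PySem.List.pyRange 0 n 1).flatMap (hitsAt pat lengths hay n)).foldl
      (fun b q => bUpd b (some q)) none with
  | none =>
    have hnil := foldl_bUpd_none _ hr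
    symm
    rw [Option.map_none, List.find?_eq_none]
    intro t ht hcond
    obtain ⟨k, hk, rfl⟩ := List.mem_iff_getElem.mp ht
    obtain ⟨j, hjm, p, hpm, _⟩ := hits_complete ts pat lengths hay n hn hpat hkey k hk hcond
    have : p ∈ ((PySem.List.pyRange 0 n 1).flatMap (hitsAt pat lengths hay n)) :=
      List.mem_flatMap.mpr ⟨j, hjm, hpm⟩
    rw [hnil] at this
    simp at this
  | some p =>
    obtain ⟨hmem, hmin, _⟩ := foldl_bUpd_min _ _ _ hr
    rcases hmem with h0 | hmem
    · exact absurd h0 (by simp)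
    obtain ⟨j, hjmem, hpj⟩ := List.mem_flatMap.mp hmem
    have hj0 : 0 ≤ j := (PySem.List.mem_pyRange_one.mp hjmem).1
    obtain ⟨hk, htsk, hcond⟩ := hits_sound ts pat lengths hay n hn hpat hlenA j hj0 p hpj
    have hfind : ts.find? (tickCond hay) = some p.2 := by
      rw [List.find?_eq_some_iff_getElem]
      refine ⟨htsk ▸ hcond, p.1, hk, htsk, ?_⟩
      intro m hm
      by_contra hb
      rw [Bool.not_eq_true, Bool.not_eq_false'] at hb
      obtain ⟨j', hj', q, hq, hqle⟩ :=
        hits_complete ts pat lengths hay n hn hpat hkey m (hm.trans hk) hb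
      have hle := hmin q (List.mem_flatMap.mpr ⟨j', hj', hq⟩)
      omega
    rw [hfind]
    rfl

-- ===== VERDICT (by name: the statement is the Claim_ definition above) =====
theorem match_ticker_py_spec : Claim_equal_match_ticker_py := by
  intro text tickers _dom
  unfold Spec_match_ticker_py match_ticker_py
  rw [alt_eq, outer_eq]
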